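-- pv_equiv track=rewrite | github.com/WhiteHusky555/Olympiads | 27.01.2025 тинькоф аисд/Dai.py | calculate_min_distance
-- ===== SOURCE A (Python) =====
-- def calculate_min_distance(n, x, q, queries):
--     x.sort()  # Сортируем массив координат
--     results = []
--
--     for a, b in queries:
--         min_distance = float('inf')
--
--         # Проверяем все уникальные значения y в x
--         for i in range(n):
--             y = x[i]
--             total_distance = 0
--
--             # Вычисляем сумму расстояний для данного y
--             for j in range(n):
--                 if y >= x[j]:
--                     total_distance += (y - x[j]) * a
--                 else:
--                     total_distance += (x[j] - y) * b
--
--             min_distance = min(min_distance, total_distance)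
--
--         results.append(min_distance)
--
--     return results
-- ===== SOURCE B (Python) =====
-- def calculate_min_distance(n, x, q, queries):
--     x.sort()
--     s = x[:n]
--     m = len(s)
--     total = sum(s)
--     lr = []
--     acc = 0
--     for i, y in enumerate(s):
--         acc += y
--         lr.append(((i + 1) * y - acc, (total - acc) - (m - 1 - i) * y))
--     return [min(a * l + b * r for l, r in lr) for a, b in queries]
-- ===== Notes on version B (the rewrite author's own statement) =====
-- stated objective: faster
-- what changed: A rescans all n points for every candidate of every query (O(q*n^2)); B sorts once, precomputes per-candidate (L,R) terms from a running prefix sum, and answers each query as min(a*L+b*R) in one O(n) pass.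
-- outside the precondition, e.g. on calculate_min_distance(0, [], 1, [(1, 2)]): A returns [inf], B raises ValueError; on calculate_min_distance(2, [5], 1, [(1, 1)]): A raises IndexError, B returns [0]
import Mathlib
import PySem

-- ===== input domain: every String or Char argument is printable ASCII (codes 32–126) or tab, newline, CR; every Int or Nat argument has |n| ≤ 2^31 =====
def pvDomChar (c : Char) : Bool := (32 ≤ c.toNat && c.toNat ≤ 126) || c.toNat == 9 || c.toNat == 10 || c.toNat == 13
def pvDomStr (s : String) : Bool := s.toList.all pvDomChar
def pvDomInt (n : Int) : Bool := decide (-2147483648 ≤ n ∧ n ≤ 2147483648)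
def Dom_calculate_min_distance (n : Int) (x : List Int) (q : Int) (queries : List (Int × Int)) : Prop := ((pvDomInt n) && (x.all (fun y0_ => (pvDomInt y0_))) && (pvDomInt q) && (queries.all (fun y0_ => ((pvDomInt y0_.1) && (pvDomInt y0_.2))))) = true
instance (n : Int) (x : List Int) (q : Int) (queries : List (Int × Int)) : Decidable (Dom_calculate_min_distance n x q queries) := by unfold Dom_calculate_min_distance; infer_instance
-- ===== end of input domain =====

-- B replaces A's O(q·n²) per-query candidate scan by sort + one prefix-sum sweep, O(1) per candidate.
-- A sorts its argument x in place; the equivalence proved here is about the RETURN value only.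

-- ===== PORT A =====
-- inner loop: total_distance over j in range(n)
def aInner (xs : List Int) (n a b y : Int) : Int :=
  (PySem.List.pyRange 0 n).foldl (fun t j =>
    let xj := PySem.List.pyGetD xs j 0
    if y ≥ xj then t + (y - xj) * a else t + (xj - y) * b) 0

-- Python's min(min_distance, total) with min_distance possibly float('inf') (= none)
def pyMinInf (md : Option Int) (t : Int) : Int :=
  match md with | none => t | some m => min m t

-- outer loop: min_distance over i in range(n); none plays float('inf')
def aMin (xs : List Int) (n a b : Int) : Option Int :=
  (PySem.List.pyRange 0 n).foldl (fun md i =>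
    let y := PySem.List.pyGetD xs i 0
    let t := aInner xs n a b y
    some (pyMinInf md t)) none

def calculate_min_distance (n : Int) (x : List Int) (q : Int) (queries : List (Int × Int)) : List Int :=
  let xs := PySem.List.sorted x id
  queries.map (fun ab => (aMin xs n ab.1 ab.2).getD 0)

-- ===== PORT B =====
-- the for-loop of Source B: builds the (L, R) pair per candidate from the running prefix sum
def bScan (m total : Int) : List Int → Int → Int → List (Int × Int)
  | [], _, _ => []
  | y :: rest, i, acc =>
    let acc' := acc + y
    ((i + 1) * y - acc', (total - acc') - (m - 1 - i) * y) :: bScan m total rest (i + 1) acc'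

def calculate_min_distance_alt (n : Int) (x : List Int) (q : Int) (queries : List (Int × Int)) : List Int :=
  let s := PySem.List.slice (PySem.List.sorted x id) none (some n)
  let m : Int := (s.length : Int)
  let total := s.sum
  let lr := bScan m total s 0 0
  queries.map (fun ab =>
    (PySem.List.min? (lr.map (fun p => ab.1 * p.1 + ab.2 * p.2)) id).getD 0)

-- ===== PRECONDITION & SPEC =====
-- Pre_ admits queries = [] (A returns [] untouched) and otherwise requires 1 ≤ n ≤ len(x):
-- for n > len(x) A raises IndexError, and for n ≤ 0 A returns float('inf') per query — a float, not an int.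
def Pre_calculate_min_distance (n : Int) (x : List Int) (q : Int) (queries : List (Int × Int)) : Prop :=
  queries = [] ∨ (1 ≤ n ∧ n ≤ (x.length : Int))
instance (n : Int) (x : List Int) (q : Int) (queries : List (Int × Int)) : Decidable (Pre_calculate_min_distance n x q queries) := by unfold Pre_calculate_min_distance; infer_instance

def pvWitness_calculate_min_distance : Int × List Int × Int × (List (Int × Int)) :=
  (3, [5, -2, 7], 2, [(1, 2), (3, 1)])

def Spec_calculate_min_distance (n : Int) (x : List Int) (q : Int) (queries : List (Int × Int)) (out : List Int) : Prop := out = calculate_min_distance_alt n x q queries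
instance (n : Int) (x : List Int) (q : Int) (queries : List (Int × Int)) (out : List Int) : Decidable (Spec_calculate_min_distance n x q queries out) := by unfold Spec_calculate_min_distance; infer_instance

-- ===== CLAIM (what is proved, stated in full; the proofs are below) =====
def Claim_equal_calculate_min_distance : Prop := ∀ (n : Int) (x : List Int) (q : Int) (queries : List (Int × Int)), Dom_calculate_min_distance n x q queries → Pre_calculate_min_distance n x q queries → Spec_calculate_min_distance n x q queries (calculate_min_distance n x q queries)

-- ===== LEMMAS AND PROOFS =====

theorem sumLow (a b y : Int) (l : List Int) (h : ∀ z ∈ l, z ≤ y) :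
    (l.map (fun z => if y ≥ z then (y - z) * a else (z - y) * b)).sum
      = a * ((l.length : Int) * y - l.sum) := by
  induction l with
  | nil => simp
  | cons z t ih =>
    have hz : z ≤ y := h z (by simp)
    simp only [List.map_cons, List.sum_cons, List.length_cons, List.sum_cons,
      if_pos (show y ≥ z from hz)]
    rw [ih (fun w hw => h w (by simp [hw]))]
    push_cast
    ring

theorem sumHigh (a b y : Int) (l : List Int) (h : ∀ z ∈ l, y ≤ z) :
    (l.map (fun z => if y ≥ z then (y - z) * a else (z - y) * b)).sum
      = b * (l.sum - (l.length : Int) * y) := by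
  induction l with
  | nil => simp
  | cons z t ih =>
    have hz : y ≤ z := h z (by simp)
    have hstep : (if y ≥ z then (y - z) * a else (z - y) * b) = (z - y) * b := by
      split_ifs with hge
      · have : z = y := le_antisymm hge hz
        subst this; ring
      · rfl
    simp only [List.map_cons, List.sum_cons, List.length_cons, hstep]
    rw [ih (fun w hw => h w (by simp [hw]))]
    push_cast
    ring

theorem sumSplit (a b : Int) (l : List Int) (hs : l.Pairwise (· ≤ ·)) (i : Nat) (hi : i < l.length) :
    (l.map (fun z => if l[i] ≥ z then (l[i] - z) * a else (z - l[i]) * b)).sum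
      = a * (((i : Int) + 1) * l[i] - (l.take (i+1)).sum)
        + b * ((l.sum - (l.take (i+1)).sum) - ((l.length : Int) - 1 - (i : Int)) * l[i]) := by
  have hmono : ∀ p q : Nat, (hpq : p < q) → (hq : q < l.length) → l[p]'(by omega) ≤ l[q] := by
    intro p q hpq hq
    exact List.pairwise_iff_getElem.mp hs p q (by omega) hq hpq
  obtain ⟨y, hy⟩ : ∃ y, l[i] = y := ⟨l[i], rfl⟩
  rw [hy]
  have hlow : ∀ z ∈ l.take (i+1), z ≤ y := by
    intro z hz
    obtain ⟨j, hj, hje⟩ := List.mem_iff_getElem.mp hz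
    have hjlen : j < l.length := by
      have h1 := List.length_take_le (i+1) l; omega
    rw [List.getElem_take] at hje
    subst hje
    rw [← hy]
    have hji : j ≤ i := by
      have h2 := hj; simp only [List.length_take] at h2; omega
    rcases eq_or_lt_of_le hji with h | h
    · subst h; exact le_refl _
    · exact hmono j i h hi
  have hhigh : ∀ z ∈ l.drop (i+1), y ≤ z := by
    intro z hz
    obtain ⟨j, hj, hje⟩ := List.mem_iff_getElem.mp hz
    rw [List.getElem_drop] at hje
    subst hje
    rw [← hy]
    have hjl : i + 1 + j < l.length := by
      simp only [List.length_drop] at hj; omega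
    exact hmono i (i+1+j) (by omega) hjl
  have hdecomp : (l.map (fun z => if y ≥ z then (y - z) * a else (z - y) * b)).sum
      = ((l.take (i+1)).map (fun z => if y ≥ z then (y - z) * a else (z - y) * b)).sum
        + ((l.drop (i+1)).map (fun z => if y ≥ z then (y - z) * a else (z - y) * b)).sum := by
    rw [← List.sum_append, ← List.map_append, List.take_append_drop]
  rw [hdecomp, sumLow a b _ _ hlow, sumHigh a b _ _ hhigh]
  have hlt : (l.take (i+1)).length = i + 1 := by
    simp only [List.length_take]; omega
  have hld : (l.drop (i+1)).length = l.length - (i+1) := by simp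
  have hsum : (l.drop (i+1)).sum = l.sum - (l.take (i+1)).sum := by
    have h3 : (l.take (i+1)).sum + (l.drop (i+1)).sum = l.sum := by
      rw [← List.sum_append, List.take_append_drop]
    omega
  rw [hlt, hld, hsum]
  have hc : ((l.length - (i+1) : Nat) : Int) = (l.length : Int) - 1 - (i : Int) := by
    omega
  rw [hc]
  push_cast
  ring

theorem optA (f : Int → Int) (l : List Int) (c : Int) :
    l.foldl (fun md y => some (pyMinInf md (f y))) (some c)
      = some (l.foldl (fun m y => min m (f y)) c) := by
  induction l generalizing c with
  | nil => rfl
  | cons y t ih => simp only [List.foldl_cons, pyMinInf]; exact ih (min c (f y))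

theorem minq : ∀ (ys : List Int) (c : Int), PySem.List.min? (c :: ys) id = some (ys.foldl min c)
  | [], c => rfl
  | y :: t, c => by
      have h := minq t (min c y)
      simp only [PySem.List.min?, List.foldl_cons, id] at h ⊢
      rcases lt_or_ge y c with hyc | hyc
      · rw [if_pos hyc]
        have hm : min c y = y := by omega
        conv_lhs => rw [← hm]
        exact h
      · rw [if_neg (not_lt.mpr hyc)]
        have hm : min c y = c := by omega
        conv_lhs => rw [← hm]
        exact h

theorem optTop (f : Int → Int) (l : List Int) :
    l.foldl (fun md y => some (pyMinInf md (f y))) none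
      = PySem.List.min? (l.map f) id := by
  cases l with
  | nil => rfl
  | cons y t =>
    have h0 : pyMinInf none (f y) = f y := rfl
    simp only [List.foldl_cons, List.map_cons, h0]
    rw [optA, minq, List.foldl_map]

theorem bScan_length (m total : Int) : ∀ (s : List Int) (i acc : Int),
    (bScan m total s i acc).length = s.length
  | [], _, _ => rfl
  | y :: rest, i, acc => by
      simp only [bScan, List.length_cons]
      rw [bScan_length m total rest (i+1) (acc+y)]

theorem bScan_getElem (m total : Int) : ∀ (s : List Int) (j : Nat) (i0 acc : Int)
    (h : j < s.length),
    (bScan m total s i0 acc)[j]'(by rw [bScan_length]; exact h) =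
      ((i0 + (j : Int) + 1) * s[j] - (acc + (s.take (j+1)).sum),
       (total - (acc + (s.take (j+1)).sum)) - (m - 1 - (i0 + (j : Int))) * s[j])
  | y :: rest, 0, i0, acc, h => by
      simp [bScan]
  | y :: rest, j+1, i0, acc, h => by
      have ih := bScan_getElem m total rest j (i0+1) (acc+y) (by simpa using h)
      simp only [bScan, List.getElem_cons_succ, List.take_succ_cons, List.sum_cons,
        List.getElem_cons_succ] at ih ⊢
      rw [ih]
      simp only [Prod.mk.injEq]
      push_cast
      constructor <;> ring

theorem innerEq (xs : List Int) (n a b y : Int) (h1 : 1 ≤ n) (h2 : n ≤ (xs.length : Int)) :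
    aInner xs n a b y
      = ((xs.take n.toNat).map (fun z => if y ≥ z then (y - z) * a else (z - y) * b)).sum := by
  have hxs : aInner xs n a b y
      = (PySem.List.pyRange 0 n).foldl (fun t j =>
          (fun t xj => if y ≥ xj then t + (y - xj) * a else t + (xj - y) * b) t
            (PySem.List.pyGetD xs j 0)) 0 := rfl
  have hlen : ((xs.take n.toNat).length : Int) = n := by
    simp [List.length_take]; omega
  have hget : ∀ (acc : Int), ∀ j ∈ PySem.List.pyRange 0 n,
      (fun t j => (fun t xj => if y ≥ xj then t + (y - xj) * a else t + (xj - y) * b) t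
          (PySem.List.pyGetD xs j 0)) acc j
      = (fun t j => (fun t xj => if y ≥ xj then t + (y - xj) * a else t + (xj - y) * b) t
          (PySem.List.pyGetD (xs.take n.toNat) j 0)) acc j := by
    intro acc j hj
    obtain ⟨hj0, hjn⟩ := PySem.List.mem_pyRange_one.mp hj
    have hjx : j < (xs.length : Int) := lt_of_lt_of_le hjn h2
    have hjt : j < ((xs.take n.toNat).length : Int) := by omega
    simp only
    rw [PySem.List.pyGetD_eq_getElem xs 0 hj0 hjx,
        PySem.List.pyGetD_eq_getElem (xs.take n.toNat) 0 hj0 hjt,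
        List.getElem_take]
  rw [hxs, PySem.List.foldl_congr_mem _ _ _ _ hget]
  set s := xs.take n.toNat with hsdef
  have hn : n = PySem.List.len s := by simp only [PySem.List.len]; omega
  rw [hn, PySem.List.foldl_pyRange_pyGetD s 0
    (fun t xj => if y ≥ xj then t + (y - xj) * a else t + (xj - y) * b) 0 (le_refl 0)]
  simp only [Int.toNat_zero, List.drop_zero]
  rw [PySem.List.foldl_congr_mem _ _
    (fun t z => t + (if y ≥ z then (y - z) * a else (z - y) * b)) _
    (by intro acc z _; simp only; split_ifs <;> rfl)]
  rw [PySem.List.foldl_add]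
  simp

theorem aMinEq (xs : List Int) (n a b : Int) (h1 : 1 ≤ n) (h2 : n ≤ (xs.length : Int)) :
    aMin xs n a b
      = PySem.List.min? ((xs.take n.toNat).map (fun y => aInner xs n a b y)) id := by
  have hxs : aMin xs n a b
      = (PySem.List.pyRange 0 n).foldl (fun md i =>
          (fun md y => some (pyMinInf md (aInner xs n a b y))) md
            (PySem.List.pyGetD xs i 0)) none := rfl
  have hlen : ((xs.take n.toNat).length : Int) = n := by
    simp [List.length_take]; omega
  have hget : ∀ (acc : Option Int), ∀ j ∈ PySem.List.pyRange 0 n,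
      (fun md i => (fun md y => some (pyMinInf md (aInner xs n a b y))) md
          (PySem.List.pyGetD xs i 0)) acc j
      = (fun md i => (fun md y => some (pyMinInf md (aInner xs n a b y))) md
          (PySem.List.pyGetD (xs.take n.toNat) i 0)) acc j := by
    intro acc j hj
    obtain ⟨hj0, hjn⟩ := PySem.List.mem_pyRange_one.mp hj
    have hjx : j < (xs.length : Int) := lt_of_lt_of_le hjn h2
    have hjt : j < ((xs.take n.toNat).length : Int) := by omega
    simp only
    rw [PySem.List.pyGetD_eq_getElem xs 0 hj0 hjx,
        PySem.List.pyGetD_eq_getElem (xs.take n.toNat) 0 hj0 hjt,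
        List.getElem_take]
  rw [hxs, PySem.List.foldl_congr_mem _ _ _ _ hget]
  set s := xs.take n.toNat with hsdef
  have hn : n = PySem.List.len s := by simp only [PySem.List.len]; omega
  rw [show PySem.List.pyRange 0 n = PySem.List.pyRange 0 (PySem.List.len s) from by rw [← hn],
      PySem.List.foldl_pyRange_pyGetD s 0
        (fun md y => some (pyMinInf md (aInner xs n a b y))) none (le_refl 0)]
  simp only [Int.toNat_zero, List.drop_zero]
  exact optTop (fun y => aInner xs n a b y) s

theorem perQuery (x : List Int) (n a b : Int) (h1 : 1 ≤ n) (h2 : n ≤ (x.length : Int)) :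
    (aMin (PySem.List.sorted x id) n a b).getD 0
      = (PySem.List.min?
          ((bScan (((PySem.List.slice (PySem.List.sorted x id) none (some n)).length : Int)
              : Int)
            (PySem.List.slice (PySem.List.sorted x id) none (some n)).sum
            (PySem.List.slice (PySem.List.sorted x id) none (some n)) 0 0).map
            (fun p => a * p.1 + b * p.2)) id).getD 0 := by
  have hslice : PySem.List.slice (PySem.List.sorted x id) none (some n)
      = (PySem.List.sorted x id).take n.toNat :=
    PySem.List.slice_to _ (by omega)
  rw [hslice]
  set xs := PySem.List.sorted x id with hxsdef
  have hlx : (xs.length : Int) = (x.length : Int) := by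
    rw [hxsdef]; exact_mod_cast congrArg Nat.cast (PySem.List.length_sorted x id false)
  have h2' : n ≤ (xs.length : Int) := by omega
  set s := xs.take n.toNat with hsdef
  have hsp : s.Pairwise (· ≤ ·) := by
    have hp : xs.Pairwise (fun a b => a ≤ b) := by
      have := PySem.List.sorted_pairwise x (id : Int → Int)
      simpa using this
    exact List.Pairwise.sublist (List.take_sublist _ _) hp
  have hlists : s.map (fun y => aInner xs n a b y)
      = (bScan ((s.length : Int)) s.sum s 0 0).map (fun p => a * p.1 + b * p.2) := by
    apply List.ext_getElem
    · simp [bScan_length]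
    · intro i hi1 hi2
      have hi : i < s.length := by simpa using hi1
      have hb := bScan_getElem (s.length : Int) s.sum s i 0 0 hi
      rw [List.getElem_map, List.getElem_map, hb]
      simp only
      rw [innerEq xs n a b s[i] h1 h2', ← hsdef, sumSplit a b s hsp i hi]
      ring
  rw [aMinEq xs n a b h1 h2', ← hsdef, hlists]

-- ===== VERDICT (by name: the statement is the Claim_ definition above) =====
theorem calculate_min_distance_spec : Claim_equal_calculate_min_distance := by
  intro n x q queries _hdom hpre
  unfold Spec_calculate_min_distance
  rcases hpre with hq | ⟨h1, h2⟩
  · subst hq; rfl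
  · simp only [calculate_min_distance, calculate_min_distance_alt]
    apply List.map_congr_left
    intro ab _
    exact perQuery x n ab.1 ab.2 h1 h2
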